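-- pv_equiv track=rewrite | github.com/nadja1908/Diplomski | scripts/postgres/curriculum_seed_utils.py | allocate_demo_x_kurikulum_slots
-- ===== SOURCE A (Python) =====
-- from collections import defaultdict
--
-- BASE_02_KURIKULUM_COUNTS: dict[int, dict[tuple[int, int], int]] = {
--     1: {(1, 1): 6, (1, 2): 5, (2, 1): 6, (2, 2): 5, (3, 1): 6, (3, 2): 5, (4, 1): 5, (4, 2): 4},
--     2: {(1, 1): 6, (1, 2): 5, (2, 1): 6, (2, 2): 5, (3, 1): 5, (3, 2): 5, (4, 1): 4, (4, 2): 4},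
--     3: {(1, 1): 6, (1, 2): 5, (2, 1): 6, (2, 2): 5, (3, 1): 5, (3, 2): 5, (4, 1): 4, (4, 2): 4},
--     4: {(1, 1): 6, (1, 2): 5, (2, 1): 6, (2, 2): 5, (3, 1): 5, (3, 2): 5, (4, 1): 4, (4, 2): 4},
--     5: {(1, 1): 6, (1, 2): 5, (2, 1): 6, (2, 2): 5, (3, 1): 5, (3, 2): 5, (4, 1): 4, (4, 2): 4},
--     6: {(1, 1): 6, (1, 2): 5, (2, 1): 6, (2, 2): 5, (3, 1): 5, (3, 2): 5, (4, 1): 4, (4, 2): 4},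
-- }
--
-- MAX_SUBJECTS_PER_CURRICULUM_YEAR = 12
--
-- MAX_SUBJECTS_PER_CURRICULUM_SEMESTER = 6
--
-- def allocate_demo_x_kurikulum_slots(prog_id: int, n_new: int) -> list[tuple[int, int]]:
--     """
--     Next n_new (godina, semestar) slots for X* demo predmeti, after real 02_data layout.
--     Greedy: fill later kurikulum years first (4→1), semestar 1 then 2; respects 12/year and 6/semester.
--     """
--     if n_new <= 0:
--         return []
--     base = BASE_02_KURIKULUM_COUNTS[prog_id]
--     occ: dict[tuple[int, int], int] = defaultdict(int)
--     for k, v in base.items():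
--         occ[k] = v
--     out: list[tuple[int, int]] = []
--     for _ in range(n_new):
--         chosen: tuple[int, int] | None = None
--         for y in (4, 3, 2, 1):
--             y_tot = occ[(y, 1)] + occ[(y, 2)]
--             if y_tot >= MAX_SUBJECTS_PER_CURRICULUM_YEAR:
--                 continue
--             for s in (1, 2):
--                 if occ[(y, s)] >= MAX_SUBJECTS_PER_CURRICULUM_SEMESTER:
--                     continue
--                 chosen = (y, s)
--                 break
--             if chosen:
--                 break
--         if chosen is None:
--             raise RuntimeError(f"cannot place demo X module for prog {prog_id}: caps exceeded")
--         occ[chosen] += 1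
--         out.append(chosen)
--     return out
-- ===== SOURCE B (Python) =====
-- BASE_02_KURIKULUM_COUNTS = {
--     1: {(1, 1): 6, (1, 2): 5, (2, 1): 6, (2, 2): 5, (3, 1): 6, (3, 2): 5, (4, 1): 5, (4, 2): 4},
--     2: {(1, 1): 6, (1, 2): 5, (2, 1): 6, (2, 2): 5, (3, 1): 5, (3, 2): 5, (4, 1): 4, (4, 2): 4},
--     3: {(1, 1): 6, (1, 2): 5, (2, 1): 6, (2, 2): 5, (3, 1): 5, (3, 2): 5, (4, 1): 4, (4, 2): 4},
--     4: {(1, 1): 6, (1, 2): 5, (2, 1): 6, (2, 2): 5, (3, 1): 5, (3, 2): 5, (4, 1): 4, (4, 2): 4},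
--     5: {(1, 1): 6, (1, 2): 5, (2, 1): 6, (2, 2): 5, (3, 1): 5, (3, 2): 5, (4, 1): 4, (4, 2): 4},
--     6: {(1, 1): 6, (1, 2): 5, (2, 1): 6, (2, 2): 5, (3, 1): 5, (3, 2): 5, (4, 1): 4, (4, 2): 4},
-- }
--
-- MAX_SUBJECTS_PER_CURRICULUM_SEMESTER = 6
--
--
-- def allocate_demo_x_kurikulum_slots(prog_id: int, n_new: int) -> list[tuple[int, int]]:
--     """Same slots, computed by building the full fill-order list once and slicing.
--
--     Since 6+6 = 12, the per-year cap of 12 can only bind when both semester caps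
--     of 6 already bind, so the fill order is simply the slots in priority order,
--     each repeated by its remaining capacity.
--     """
--     if n_new <= 0:
--         return []
--     base = BASE_02_KURIKULUM_COUNTS[prog_id]
--     available: list[tuple[int, int]] = []
--     for slot in ((4, 1), (4, 2), (3, 1), (3, 2), (2, 1), (2, 2), (1, 1), (1, 2)):
--         available.extend([slot] * (MAX_SUBJECTS_PER_CURRICULUM_SEMESTER - base[slot]))
--     if len(available) < n_new:
--         raise RuntimeError(f"cannot place demo X module for prog {prog_id}: caps exceeded")
--     return available[:n_new]
-- ===== Notes on version B (the rewrite author's own statement) =====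
-- stated objective: simpler
-- what changed: Replaces the per-item greedy rescan of all 8 slots (with per-year and per-semester cap checks) by building the fixed fill-order list of remaining capacities once and returning its first n_new elements; the 12/year cap is provably redundant since 6+6=12.
import Mathlib
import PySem

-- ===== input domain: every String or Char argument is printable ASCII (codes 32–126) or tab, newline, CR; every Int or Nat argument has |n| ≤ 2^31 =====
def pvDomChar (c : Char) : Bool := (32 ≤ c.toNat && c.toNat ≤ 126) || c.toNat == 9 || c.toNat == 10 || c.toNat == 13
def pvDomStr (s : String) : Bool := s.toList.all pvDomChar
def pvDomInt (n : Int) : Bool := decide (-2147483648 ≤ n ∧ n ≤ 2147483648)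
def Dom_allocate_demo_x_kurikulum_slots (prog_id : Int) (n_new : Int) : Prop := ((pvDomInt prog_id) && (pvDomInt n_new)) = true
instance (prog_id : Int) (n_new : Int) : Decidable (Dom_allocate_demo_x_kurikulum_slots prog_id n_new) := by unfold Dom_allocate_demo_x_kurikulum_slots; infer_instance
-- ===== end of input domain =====

-- B replaces A's per-item greedy rescan by building the full fill-order list once and slicing (simpler).
-- Both Pythons raise (KeyError / RuntimeError) outside Pre_; equivalence is claimed on Pre_ only.

-- shared module constant BASE_02_KURIKULUM_COUNTS (data, used by both A and B)
def pvBaseTable (prog_id : Int) : List ((Int × Int) × Int) :=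
  if prog_id = 1 then
    [((1,1),6), ((1,2),5), ((2,1),6), ((2,2),5), ((3,1),6), ((3,2),5), ((4,1),5), ((4,2),4)]
  else if prog_id = 2 ∨ prog_id = 3 ∨ prog_id = 4 ∨ prog_id = 5 ∨ prog_id = 6 then
    [((1,1),6), ((1,2),5), ((2,1),6), ((2,2),5), ((3,1),5), ((3,2),5), ((4,1),4), ((4,2),4)]
  else []  -- KeyError in Python; excluded by Pre_

-- ===== PORT A =====
-- inner double scan: for y in (4,3,2,1): … for s in (1,2): … with the two breaks
def pvChoose (occ : PySem.Dict (Int × Int) Int) : Option (Int × Int) :=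
  ([4, 3, 2, 1] : List Int).foldl
    (fun chosen y =>
      match chosen with
      | some _ => chosen   -- already broken out of the y-loop
      | none =>
        let y_tot := occ.getD (y, 1) 0 + occ.getD (y, 2) 0
        if y_tot ≥ 12 then none   -- continue
        else
          ([1, 2] : List Int).foldl
            (fun c s =>
              match c with
              | some _ => c
              | none => if occ.getD (y, s) 0 ≥ 6 then none else some (y, s))
            none)
    none

def allocate_demo_x_kurikulum_slots (prog_id : Int) (n_new : Int) : List (Int × Int) :=
  if n_new ≤ 0 then []
  else
    let base := pvBaseTable prog_id
    let occ0 : PySem.Dict (Int × Int) Int :=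
      base.foldl (fun d kv => d.insert kv.1 kv.2) PySem.Dict.empty
    let st :=
      (PySem.List.pyRange 0 n_new 1).foldl
        (fun (st : PySem.Dict (Int × Int) Int × List (Int × Int)) _ =>
          match pvChoose st.1 with
          | none => st   -- Python raises RuntimeError here; excluded by Pre_
          | some c => (st.1.insert c (st.1.getD c 0 + 1), st.2 ++ [c]))
        (occ0, [])
    st.2

-- ===== PORT B =====
def allocate_demo_x_kurikulum_slots_alt (prog_id : Int) (n_new : Int) : List (Int × Int) :=
  if n_new ≤ 0 then []
  else
    let base := PySem.Dict.ofList (pvBaseTable prog_id)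
    let available :=
      ([(4, 1), (4, 2), (3, 1), (3, 2), (2, 1), (2, 2), (1, 1), (1, 2)] : List (Int × Int)).foldl
        (fun acc slot => acc ++ List.replicate (6 - base.getD slot 0).toNat slot) []
    if (available.length : Int) < n_new then []   -- Python raises RuntimeError here; excluded by Pre_
    else available.take n_new.toNat

-- ===== PRECONDITION & SPEC =====
-- Pre_ excludes exactly the inputs where A raises: KeyError for prog_id outside 1..6 (when n_new > 0),
-- and RuntimeError when n_new exceeds the remaining capacity (6 for prog 1, 8 for progs 2..6).
def Pre_allocate_demo_x_kurikulum_slots (prog_id : Int) (n_new : Int) : Prop :=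
  n_new ≤ 0 ∨ (1 ≤ prog_id ∧ prog_id ≤ 6 ∧ n_new ≤ (if prog_id = 1 then 6 else 8))
instance (prog_id : Int) (n_new : Int) : Decidable (Pre_allocate_demo_x_kurikulum_slots prog_id n_new) := by unfold Pre_allocate_demo_x_kurikulum_slots; infer_instance

def pvWitness_allocate_demo_x_kurikulum_slots : Int × Int := (2, 5)

def Spec_allocate_demo_x_kurikulum_slots (prog_id : Int) (n_new : Int) (out : List (Int × Int)) : Prop := out = allocate_demo_x_kurikulum_slots_alt prog_id n_new
instance (prog_id : Int) (n_new : Int) (out : List (Int × Int)) : Decidable (Spec_allocate_demo_x_kurikulum_slots prog_id n_new out) := by unfold Spec_allocate_demo_x_kurikulum_slots; infer_instance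

-- ===== CLAIM (what is proved, stated in full; the proofs are below) =====
def Claim_equal_allocate_demo_x_kurikulum_slots : Prop := ∀ (prog_id : Int) (n_new : Int), Dom_allocate_demo_x_kurikulum_slots prog_id n_new → Pre_allocate_demo_x_kurikulum_slots prog_id n_new → Spec_allocate_demo_x_kurikulum_slots prog_id n_new (allocate_demo_x_kurikulum_slots prog_id n_new)

-- ===== LEMMAS AND PROOFS =====

-- ===== VERDICT (by name: the statement is the Claim_ definition above) =====
theorem allocate_demo_x_kurikulum_slots_spec : Claim_equal_allocate_demo_x_kurikulum_slots := by
  intro prog_id n_new _ hpre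
  unfold Spec_allocate_demo_x_kurikulum_slots
  by_cases h0 : n_new ≤ 0
  · simp [allocate_demo_x_kurikulum_slots, allocate_demo_x_kurikulum_slots_alt, h0]
  · rcases hpre with h0' | ⟨h1, h6, hcap⟩
    · exact absurd h0' h0
    · have hn1 : (1:Int) ≤ n_new := by omega
      interval_cases prog_id <;> norm_num at hcap <;> interval_cases n_new <;> decide
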